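-- pv_equiv track=rewrite | github.com/slavsent/one-work | home_work_1.py | num_diapason
-- ===== SOURCE A (Python) =====
-- from collections import deque
--
-- def num_diapason(number):
--     """
--     Список диапазона числа от отрицательного значения до самого числа
--     :param number: число
--     :return: список чисел
--     """
--     try:
--         num_int = int(number)
--     except ValueError:
--         return 'Вы ввели не число'
--     else:
--         res = deque()
--         res.append(0)
--         for i in range(1, num_int + 1):
--             res.append(i)
--             res.appendleft(i * -1)
--         return list(res)
-- ===== SOURCE B (Python) =====
-- def num_diapason(number):
--     """
--     Список диапазона числа от отрицательного значения до самого числа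
--     :param number: число
--     :return: список чисел
--     """
--     try:
--         num_int = int(number)
--     except ValueError:
--         return 'Вы ввели не число'
--     return list(range(-num_int, 0)) + [0] + list(range(1, num_int + 1))
-- ===== Notes on version B (the rewrite author's own statement) =====
-- stated objective: simpler
-- what changed: The element-by-element deque loop (append right, appendleft negation) is replaced by a direct concatenation of two range constructors around [0].
import Mathlib
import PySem

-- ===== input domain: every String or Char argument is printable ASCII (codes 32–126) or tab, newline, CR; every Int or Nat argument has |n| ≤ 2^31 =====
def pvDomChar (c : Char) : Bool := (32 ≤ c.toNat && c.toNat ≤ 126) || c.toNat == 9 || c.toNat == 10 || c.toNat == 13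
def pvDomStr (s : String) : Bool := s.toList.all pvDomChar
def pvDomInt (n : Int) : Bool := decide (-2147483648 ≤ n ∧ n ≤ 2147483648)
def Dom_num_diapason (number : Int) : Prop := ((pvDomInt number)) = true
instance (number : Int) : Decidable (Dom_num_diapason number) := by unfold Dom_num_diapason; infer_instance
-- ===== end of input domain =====

-- B builds the range by concatenating two range constructors instead of a two-ended deque loop (objective: simpler).
-- For an Int argument int(number) never raises, so the except-branch of both Pythons is unreachable here.
-- ===== PORT A =====
def num_diapason (number : Int) : List Int :=
  (PySem.List.pyRange 1 (number + 1) 1).foldl (fun res i => ((-i) :: res) ++ [i]) [0]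

-- ===== PORT B =====
def num_diapason_alt (number : Int) : List Int :=
  PySem.List.pyRange (-number) 0 1 ++ [0] ++ PySem.List.pyRange 1 (number + 1) 1

-- ===== PRECONDITION & SPEC =====
def Spec_num_diapason (number : Int) (out : List Int) : Prop := out = num_diapason_alt number
instance (number : Int) (out : List Int) : Decidable (Spec_num_diapason number out) := by unfold Spec_num_diapason; infer_instance

-- ===== CLAIM (what is proved, stated in full; the proofs are below) =====
def Claim_equal_num_diapason : Prop := ∀ (number : Int), Dom_num_diapason number → Spec_num_diapason number (num_diapason number)

-- ===== LEMMAS AND PROOFS =====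

-- ===== VERDICT (by name: the statement is the Claim_ definition above) =====
lemma num_diapason_loop (k : Nat) :
    (PySem.List.pyRange 1 ((k : Int) + 1) 1).foldl (fun res i => ((-i) :: res) ++ [i]) [0]
      = PySem.List.pyRange (-(k : Int)) 0 1 ++ [0] ++ PySem.List.pyRange 1 ((k : Int) + 1) 1 := by
  induction k with
  | zero => simp [PySem.List.pyRange_one_eq_nil]
  | succ k ih =>
      push_cast
      rw [PySem.List.pyRange_one_succ_right (by omega), List.foldl_append, ih]
      rw [show PySem.List.pyRange (-((k : Int) + 1)) 0 1
            = (-((k : Int) + 1)) :: PySem.List.pyRange (-(k : Int)) 0 1 by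
        rw [PySem.List.pyRange_one_cons (by omega)]
        norm_num]
      simp
theorem num_diapason_spec : Claim_equal_num_diapason := by
  intro n _
  unfold Spec_num_diapason num_diapason num_diapason_alt
  rcases le_or_gt n 0 with h | h
  · rw [PySem.List.pyRange_one_eq_nil (by omega), PySem.List.pyRange_one_eq_nil (by omega)]
    simp
  · have := num_diapason_loop n.toNat
    rwa [Int.toNat_of_nonneg (by omega)] at this
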